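-- pv_equiv track=rewrite | github.com/Rasit-NP/Algorithm-Solutions | 백준/Gold/2866. 문자열 잘라내기/문자열 잘라내기.py | check
-- ===== SOURCE A (Python) =====
-- def check(test_board):
--     lst = []
--     for i in range(len(test_board[0])):
--         letter = ''
--         for j in range(len(test_board)):
--             letter += test_board[j][i]
--         lst.append(letter)
--     if len(lst) == len(set(lst)):
--         return True
--     else:
--         return False
-- ===== SOURCE B (Python) =====
-- def check(test_board):
--     cols = [[] for _ in range(len(test_board[0]))]
--     for row in test_board:
--         for col, ch in zip(cols, row):
--             col.append(ch)
--     cols = sorted(''.join(col) for col in cols)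
--     return all(x != y for x, y in zip(cols, cols[1:]))
-- ===== Notes on version B (the rewrite author's own statement) =====
-- stated objective: alternative
-- what changed: B builds the columns row-by-row by zipping a running per-column buffer with each row (instead of A's column-index outer loop with an inner row-index loop), then decides distinctness by sorting the columns and scanning adjacent pairs instead of comparing the list length with the size of a hash set.
import Mathlib
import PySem

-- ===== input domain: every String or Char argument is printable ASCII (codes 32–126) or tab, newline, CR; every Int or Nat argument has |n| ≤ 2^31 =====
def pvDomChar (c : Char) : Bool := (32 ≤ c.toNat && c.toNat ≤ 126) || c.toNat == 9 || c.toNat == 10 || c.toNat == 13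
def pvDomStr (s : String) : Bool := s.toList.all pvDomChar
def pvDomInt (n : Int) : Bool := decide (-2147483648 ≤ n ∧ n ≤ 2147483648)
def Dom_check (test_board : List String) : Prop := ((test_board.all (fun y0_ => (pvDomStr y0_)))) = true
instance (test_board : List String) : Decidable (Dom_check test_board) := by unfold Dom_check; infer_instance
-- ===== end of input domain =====

-- B replaces A's column-index double loop + hash-set size test by a row-wise zip accumulation of the
-- columns followed by sort-and-adjacent-scan distinctness (objective: alternative, same cost).

-- ===== PORT A =====
-- letters are kept as List Char (PySem convention); test_board[j][i] is pyGetD under Pre_ (in range there)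
def check (test_board : List String) : Bool :=
  let rows := test_board.map String.toList
  let lst := (PySem.List.pyRange 0 ((PySem.List.pyGetD rows 0 []).length : Int) 1).map
    (fun i => (PySem.List.pyRange 0 (rows.length : Int) 1).foldl
      (fun letter j => letter ++ [PySem.List.pyGetD (PySem.List.pyGetD rows j []) i ' ']) ([] : List Char))
  if lst.length = (PySem.Set.ofList lst).length then true else false

-- ===== PORT B =====
-- all(x != y for x, y in zip(cols, cols[1:]))
def pvAdjAllNe (l : List (List Char)) : Bool :=
  match l with
  | [] => true
  | [_] => true
  | a :: b :: t => (a != b) && pvAdjAllNe (b :: t)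

def check_alt (test_board : List String) : Bool :=
  let rows := test_board.map String.toList
  let cols := rows.foldl (fun cs row => (cs.zip row).map (fun p => p.1 ++ [p.2]) ++ cs.drop row.length)
    (List.replicate (rows.headD []).length ([] : List Char))
  pvAdjAllNe (PySem.List.sorted cols (fun x => x) false)

-- ===== PRECONDITION & SPEC =====
-- Pre_ excludes exactly the inputs where A raises IndexError: the empty board (test_board[0])
-- and boards where some row is shorter than the first row (test_board[j][i] out of range);
-- on that second kind B's zip truncates to the common width and returns a bool where A raises.
def Pre_check (test_board : List String) : Prop :=
  test_board ≠ [] ∧ ∀ r ∈ test_board, (test_board.headD "").toList.length ≤ r.toList.length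
instance (test_board : List String) : Decidable (Pre_check test_board) := by unfold Pre_check; infer_instance
def pvWitness_check : List String := ["ab", "cb"]

def Spec_check (test_board : List String) (out : Bool) : Prop := out = check_alt test_board
instance (test_board : List String) (out : Bool) : Decidable (Spec_check test_board out) := by unfold Spec_check; infer_instance

-- ===== CLAIM (what is proved, stated in full; the proofs are below) =====
def Claim_equal_check : Prop := ∀ (test_board : List String), Dom_check test_board → Pre_check test_board → Spec_check test_board (check test_board)

-- ===== LEMMAS AND PROOFS =====

theorem pvInstBridge : (fun (a b : List Char) => a.decidableLT b) = (LinearOrder.toDecidableLT (α := List Char)) := by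
  funext a b; exact Subsingleton.elim _ _

-- the adjacent-pair scan is IsChain (· ≠ ·)
theorem pvAdj_iff (l : List (List Char)) : pvAdjAllNe l = true ↔ l.IsChain (· ≠ ·) := by
  match l with
  | [] => simp [pvAdjAllNe]
  | [a] => simp [pvAdjAllNe]
  | a :: b :: t =>
    rw [List.isChain_cons_cons, ← pvAdj_iff (b :: t)]
    simp [pvAdjAllNe, pvAdj_iff]

-- len(lst) == len(set(lst)) is Nodup
theorem pvSetLen_iff (xs : List (List Char)) : xs.length = (PySem.Set.ofList xs).length ↔ xs.Nodup := by
  induction xs with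
  | nil => simp
  | cons x xs ih =>
    rw [PySem.Set.ofList_cons]
    by_cases hx : x ∈ xs
    · have hd : (PySem.Set.ofList xs).discard x = (PySem.Set.ofList xs).filter (fun y => !(y == x)) := by
        simp [PySem.Set.discard]
      have h1 : ((PySem.Set.ofList xs).discard x).length < (PySem.Set.ofList xs).length := by
        rw [hd]
        exact List.length_filter_lt_length_iff_exists.mpr
          ⟨x, (PySem.Set.mem_ofList _ _).mpr hx, by simp⟩
      have h2 := PySem.Set.length_ofList_le xs
      simp only [List.length_cons, List.nodup_cons]
      constructor
      · intro h; omega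
      · rintro ⟨h, -⟩; exact absurd hx h
    · have hd : (PySem.Set.ofList xs).discard x = (PySem.Set.ofList xs).filter (fun y => !(y == x)) := by
        simp [PySem.Set.discard]
      have hd2 : (PySem.Set.ofList xs).discard x = PySem.Set.ofList xs := by
        rw [hd]
        exact List.filter_eq_self.mpr (fun y hy => by
          have hyx : y ≠ x := fun h => hx (h ▸ (PySem.Set.mem_ofList _ _).mp hy)
          simp [hyx])
      simp [hd2, List.nodup_cons, hx, ih]

theorem pvChainLt (l : List (List Char)) (h1 : l.IsChain (· ≠ ·)) (h2 : l.Pairwise (· ≤ ·)) :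
    l.IsChain (· < ·) := by
  induction l with
  | nil => simp
  | cons a t ih =>
    cases t with
    | nil => simp
    | cons b t' =>
      rw [List.isChain_cons_cons] at h1 ⊢
      rw [List.pairwise_cons] at h2
      exact ⟨lt_of_le_of_ne (h2.1 b (by simp)) h1.1, ih h1.2 h2.2⟩

-- sort-and-scan is Nodup
theorem pvSorted_iff (xs : List (List Char)) :
    pvAdjAllNe (PySem.List.sorted xs (fun x => x) false) = true ↔ xs.Nodup := by
  rw [pvAdj_iff, pvInstBridge]
  have hperm : (@PySem.List.sorted (List Char) (List Char) _ LinearOrder.toDecidableLT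
      xs (fun x => x) false).Perm xs :=
    @PySem.List.sorted_perm (List Char) (List Char) _ LinearOrder.toDecidableLT xs (fun x => x) false
  constructor
  · intro h
    have hp := PySem.List.sorted_pairwise (κ := List Char) xs (fun x => x)
    have hlt := pvChainLt _ h hp
    have hnd : (@PySem.List.sorted (List Char) (List Char) _ LinearOrder.toDecidableLT
        xs (fun x => x) false).Nodup :=
      (List.isChain_iff_pairwise.mp hlt).imp (@fun a b hab => ne_of_lt hab)
    exact hperm.nodup_iff.mp hnd
  · intro h
    have hp : (@PySem.List.sorted (List Char) (List Char) _ LinearOrder.toDecidableLT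
        xs (fun x => x) false).Pairwise (· ≠ ·) := hperm.nodup_iff.mpr h
    exact hp.isChain

-- a list is the range-map of its getD
theorem pvGetDRange (xs : List (List Char)) :
    (List.range xs.length).map (fun i => xs.getD i []) = xs := by
  apply List.ext_getElem
  · simp
  · intro i h1 h2
    simp [List.getElem?_eq_getElem h2]

-- row-wise zip accumulation builds exactly the column list
theorem pvFoldlZip (rows : List (List Char)) (acc : List (List Char))
    (h : ∀ r ∈ rows, acc.length ≤ r.length) :
    rows.foldl (fun cs row => (cs.zip row).map (fun p => p.1 ++ [p.2]) ++ cs.drop row.length) acc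
      = (List.range acc.length).map (fun i => acc.getD i [] ++ rows.map (fun r => r.getD i ' ')) := by
  induction rows generalizing acc with
  | nil => simpa using (pvGetDRange acc).symm
  | cons r rows ih =>
    rw [List.foldl_cons]
    have hlen : acc.length ≤ r.length := h r (by simp)
    rw [List.drop_eq_nil_of_le hlen, List.append_nil]
    have hlen' : ((acc.zip r).map fun p => p.1 ++ [p.2]).length = acc.length := by
      simp [List.length_zip]; omega
    rw [ih _ (fun r' hr' => by rw [hlen']; exact h r' (by simp [hr'])), hlen']
    apply List.map_congr_left
    intro i hi
    rw [List.mem_range] at hi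
    have h1 : (((acc.zip r).map fun p => p.1 ++ [p.2])).getD i []
        = acc.getD i [] ++ [r.getD i ' '] := by
      rw [List.getD_eq_getElem _ _ (by rw [hlen']; exact hi),
        List.getD_eq_getElem _ _ hi, List.getD_eq_getElem _ _ (lt_of_lt_of_le hi hlen)]
      simp [List.getElem_zip]
    rw [h1]
    simp

-- ===== VERDICT (by name: the statement is the Claim_ definition above) =====
-- the inner j-loop of A is a map over the rows
theorem pvLstA (rows : List (List Char)) (i : Int) :
    (PySem.List.pyRange 0 (rows.length : Int) 1).foldl
      (fun letter j => letter ++ [PySem.List.pyGetD (PySem.List.pyGetD rows j []) i ' ']) []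
    = rows.map (fun r => PySem.List.pyGetD r i ' ') := by
  rw [PySem.List.foldl_pyRange_zero_pyGetD' rows []
    (fun letter r => letter ++ [PySem.List.pyGetD r i ' ']) []]
  rw [PySem.List.foldl_append_singleton_eq_map]
  simp

theorem pvHeadD (rows : List (List Char)) : rows.headD [] = rows.getD 0 [] := by
  cases rows <;> rfl

theorem check_spec : Claim_equal_check := by
  intro tb _ hpre
  unfold Spec_check check check_alt
  rcases hpre with ⟨hne, hall⟩
  simp only [PySem.List.pyGetD_zero, pvHeadD]
  set rows := tb.map String.toList with hrows
  set w := (rows.getD 0 []).length with hw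
  -- the width is the first row's length, and every row is at least that long
  have hwall : ∀ r ∈ rows, w ≤ r.length := by
    intro r hr
    rcases List.mem_map.mp hr with ⟨s, hs, rfl⟩
    have : (rows.getD 0 []) = (tb.headD "").toList := by
      cases tb with
      | nil => exact absurd rfl hne
      | cons s0 t => simp [hrows]
    rw [hw, this]
    exact hall s hs
  -- A's column list
  have hA : (PySem.List.pyRange 0 (w : Int) 1).map
      (fun i => (PySem.List.pyRange 0 (rows.length : Int) 1).foldl
        (fun letter j => letter ++ [PySem.List.pyGetD (PySem.List.pyGetD rows j []) i ' ']) ([] : List Char))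
      = (List.range w).map (fun k => rows.map (fun r => r.getD k ' ')) := by
    simp only [pvLstA]
    rw [PySem.List.pyRange_zero_nat, List.map_map]
    apply List.map_congr_left
    intro k hk
    apply List.map_congr_left
    intro r hr
    simp [PySem.List.pyGetD_natCast]
  -- B's column list is the same
  have hB : rows.foldl (fun cs row => (cs.zip row).map (fun p => p.1 ++ [p.2]) ++ cs.drop row.length)
      (List.replicate w ([] : List Char))
      = (List.range w).map (fun k => rows.map (fun r => r.getD k ' ')) := by
    rw [pvFoldlZip rows _ (by intro r hr; rw [List.length_replicate]; exact hwall r hr)]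
    rw [List.length_replicate]
    apply List.map_congr_left
    intro k hk
    rw [List.mem_range] at hk
    rw [List.getD_replicate _ hk]
    simp
  rw [hA, hB]
  set lst := (List.range w).map (fun k => rows.map (fun r => r.getD k ' ')) with hlst
  by_cases hnd : lst.Nodup
  · rw [if_pos ((pvSetLen_iff _).mpr hnd)]
    exact ((pvSorted_iff _).mpr hnd).symm
  · rw [if_neg (fun h => hnd ((pvSetLen_iff _).mp h))]
    cases hx : pvAdjAllNe (PySem.List.sorted lst (fun x => x) false) with
    | false => rfl
    | true => exact absurd ((pvSorted_iff _).mp hx) hnd
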